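-- pv_equiv track=rewrite | github.com/drbsmith/auto_code_commenter | src/header_generator.py | CheckForHeader
-- ===== SOURCE A (Python) =====
-- def CheckForHeader(code):
-- 	"""! the header should be the first thing in the file
-- 	Look for a complete comment block
-- 	"""
--
-- 	# perform initial cleanup, remove empty lines
-- 	# code = [l for l in lines if l != '']
--
-- 	header = None
-- 	exists = False
-- 	for x in code:
-- 		if exists:
-- 			header.append(x)
-- 			if x.find('"""') > -1: # end of header
-- 				break
-- 		# do this test second to not trigger end test
-- 		if x.find('"""!') > -1:
-- 			# fully left justified comment block. Should be the file header, but could it be somewhere else in the file?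
-- 			exists = True
-- 			header = [x]
--
-- 	return header
-- ===== SOURCE B (Python) =====
-- def CheckForHeader(code):
-- 	lines = list(code)
-- 	starts = [i for i, line in enumerate(lines) if line.find('"""!') > -1]
-- 	if not starts:
-- 		return None
-- 	s = starts[0]
-- 	ends = [j for j in range(s + 1, len(lines)) if lines[j].find('"""') > -1]
-- 	e = ends[0] + 1 if ends else len(lines)
-- 	return lines[s:e]
-- ===== Notes on version B (the rewrite author's own statement) =====
-- stated objective: alternative
-- what changed: Replaces A's single flag-driven scan (exists flag, mutable header list, re-testing markers inside one loop) with an index-based computation: two comprehensions collect the positions of the start and end markers, and the result is the slice lines[s:e].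
import Mathlib
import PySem

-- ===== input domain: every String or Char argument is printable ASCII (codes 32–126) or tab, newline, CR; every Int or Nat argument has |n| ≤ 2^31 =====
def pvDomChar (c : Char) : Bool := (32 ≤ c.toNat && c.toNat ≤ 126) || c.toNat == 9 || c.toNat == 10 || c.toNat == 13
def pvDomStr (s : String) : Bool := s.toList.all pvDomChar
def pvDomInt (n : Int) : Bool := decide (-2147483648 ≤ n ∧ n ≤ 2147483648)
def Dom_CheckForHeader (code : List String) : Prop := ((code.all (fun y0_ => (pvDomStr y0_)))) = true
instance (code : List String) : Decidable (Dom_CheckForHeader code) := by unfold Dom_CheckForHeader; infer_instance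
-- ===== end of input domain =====

-- B replaces A's single flag-driven scan with an index-based computation: two
-- comprehensions collect the start and end marker indices, and the result is the
-- slice lines[s:e]; same cost, equal return value.

-- ===== PORT A =====
-- literal port of A's loop: state = (header, exists); 'break' is an early return
def chLoopA : List String → Option (List String) → Bool → Option (List String)
  | [], header, _ => header
  | x :: rest, header, ex =>
    if ex then
      let header' := header.map (fun l => l ++ [x])   -- header.append(x)
      if PySem.Str.find x "\"\"\"" > -1 then header'  -- break
      else if PySem.Str.find x "\"\"\"!" > -1 then chLoopA rest (some [x]) true
      else chLoopA rest header' true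
    else
      if PySem.Str.find x "\"\"\"!" > -1 then chLoopA rest (some [x]) true
      else chLoopA rest header ex

def CheckForHeader (code : List String) : Option (List String) :=
  chLoopA code none false

-- ===== PORT B =====
-- starts = [i for i, line in enumerate(lines) if line.find('"""!') > -1]
-- ends   = [j for j in range(s + 1, len(lines)) if lines[j].find('"""') > -1]
-- return lines[s:e]
def CheckForHeader_alt (code : List String) : Option (List String) :=
  let lines := code
  let starts := ((PySem.List.enumerate lines 0).filter
      (fun p => PySem.Str.find p.2 "\"\"\"!" > -1)).map (fun p => p.1)
  match starts with
  | [] => none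
  | s :: _ =>
    let ends := (PySem.List.pyRange (s + 1) (PySem.List.len lines) 1).filter
        (fun j => PySem.Str.find (PySem.List.pyGetD lines j "") "\"\"\"" > -1)
    let e : Int := match ends with | [] => PySem.List.len lines | j :: _ => j + 1
    some (PySem.List.slice lines (some s) (some e))

-- ===== PRECONDITION & SPEC =====
def Spec_CheckForHeader (code : List String) (out : Option (List String)) : Prop := out = CheckForHeader_alt code
instance (code : List String) (out : Option (List String)) : Decidable (Spec_CheckForHeader code out) := by unfold Spec_CheckForHeader; infer_instance

-- ===== CLAIM (what is proved, stated in full; the proofs are below) =====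
def Claim_equal_CheckForHeader : Prop := ∀ (code : List String), Dom_CheckForHeader code → Spec_CheckForHeader code (CheckForHeader code)

-- ===== LEMMAS AND PROOFS =====

-- proof-side common form: first start line, then the collected tail
def chFindStart : List String → Option (String × List String)
  | [] => none
  | x :: rest =>
    if PySem.Str.find x "\"\"\"!" == -1 then chFindStart rest else some (x, rest)

def chCollect : List String → List String
  | [] => []
  | x :: rest => if PySem.Str.find x "\"\"\"" > -1 then [x] else x :: chCollect rest

def chSpec (code : List String) : Option (List String) :=
  match chFindStart code with
  | none => none
  | some (x, rest) => some (x :: chCollect rest)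

-- number of lines B's collection phase keeps (index of first end marker + 1, else all)
def chEndLen : List String → Nat
  | [] => 0
  | x :: rest => if PySem.Str.find x "\"\"\"" > -1 then 1 else 1 + chEndLen rest

-- a line containing the start marker '"""!' also contains the end marker '"""'
theorem find_start_imp_end (l : List Char)
    (h : (-1 : Int) < PySem.Chars.find l ['\"', '\"', '\"', '!']) :
    (-1 : Int) < PySem.Chars.find l ['\"', '\"', '\"'] := by
  have h1 : (0 : Int) ≤ PySem.Chars.find l ['\"', '\"', '\"', '!'] := by omega
  rw [PySem.Chars.find_nonneg_iff] at h1
  have h2 : ['\"', '\"', '\"'] <:+: ['\"', '\"', '\"', '!'] := by decide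
  have h3 := h2.trans h1
  rw [← PySem.Chars.find_nonneg_iff] at h3
  omega

-- ==== Part I : A's flag loop computes chSpec ====

theorem loopA_collect (rest acc : List String) :
    chLoopA rest (some acc) true = some (acc ++ chCollect rest) := by
  induction rest generalizing acc with
  | nil => simp [chLoopA, chCollect]
  | cons x xs ih =>
    by_cases h1 : (-1 : Int) < PySem.Chars.find x.toList ['\"', '\"', '\"']
    · simp [chLoopA, chCollect, h1]
    · by_cases h2 : (-1 : Int) < PySem.Chars.find x.toList ['\"', '\"', '\"', '!']
      · exact absurd (find_start_imp_end _ h2) h1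
      · simp [chLoopA, chCollect, h1, h2, ih]

theorem loopA_spec (code : List String) :
    chLoopA code none false = chSpec code := by
  induction code with
  | nil => simp [chLoopA, chSpec, chFindStart]
  | cons x xs ih =>
    by_cases h : (-1 : Int) < PySem.Chars.find x.toList ['\"', '\"', '\"', '!']
    · have hne : ¬ PySem.Chars.find x.toList ['\"', '\"', '\"', '!'] = -1 := by omega
      simp [chLoopA, chSpec, chFindStart, h, hne, loopA_collect]
    · have hle := PySem.Chars.neg_one_le_find x.toList ['\"', '\"', '\"', '!']
      have heq : PySem.Chars.find x.toList ['\"', '\"', '\"', '!'] = -1 := by omega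
      simp [chLoopA, chSpec, chFindStart, heq] at ih ⊢
      exact ih

-- ==== Part II : B's index computation computes chSpec ====

theorem tlStart : ("\"\"\"!" : String).toList = ['\"', '\"', '\"', '!'] := by decide

theorem tlEnd : ("\"\"\"" : String).toList = ['\"', '\"', '\"'] := by decide

-- no start marker anywhere: the starts comprehension is empty
theorem starts_none (code : List String) (off : Int)
    (h : chFindStart code = none) :
    (PySem.List.enumerate code off).filter
      (fun p => PySem.Str.find p.2 "\"\"\"!" > -1) = [] := by
  induction code generalizing off with
  | nil => simp [PySem.List.enumerate_nil]
  | cons x xs ih =>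
    simp only [chFindStart] at h
    by_cases hx : PySem.Chars.find x.toList ['\"', '\"', '\"', '!'] = -1
    · rw [if_pos (by simp [PySem.Str.find_eq, tlStart, hx])] at h
      rw [PySem.List.enumerate_cons,
        List.filter_cons_of_neg (by simp [PySem.Str.find_eq, tlStart, hx])]
      exact ih _ h
    · rw [if_neg (by simp [PySem.Str.find_eq, tlStart, hx])] at h
      exact absurd h (by simp)

-- first start marker at position p: the starts comprehension begins with off + p
theorem starts_some (code : List String) (off : Int) (x : String) (rest : List String)
    (h : chFindStart code = some (x, rest)) :
    ∃ (p : Nat) (tl : List Int),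
      ((PySem.List.enumerate code off).filter
        (fun q => PySem.Str.find q.2 "\"\"\"!" > -1)).map (fun q => q.1)
        = (off + (p : Int)) :: tl ∧ code.drop p = x :: rest := by
  induction code generalizing off with
  | nil => simp [chFindStart] at h
  | cons y ys ih =>
    simp only [chFindStart] at h
    by_cases hy : PySem.Chars.find y.toList ['\"', '\"', '\"', '!'] = -1
    · rw [if_pos (by simp [PySem.Str.find_eq, tlStart, hy])] at h
      obtain ⟨p, tl, h1, h2⟩ := ih (off + 1) h
      refine ⟨p + 1, tl, ?_, ?_⟩
      · rw [PySem.List.enumerate_cons]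
        rw [List.filter_cons_of_neg (by simp [PySem.Str.find_eq, tlStart, hy])]
        rw [h1]
        congr 1
        push_cast
        ring
      · simpa using h2
    · rw [if_neg (by simp [PySem.Str.find_eq, tlStart, hy])] at h
      rw [Option.some.injEq, Prod.mk.injEq] at h
      obtain ⟨rfl, rfl⟩ := h
      have hgt : (-1 : Int) < PySem.Chars.find y.toList ['\"', '\"', '\"', '!'] := by
        have := PySem.Chars.neg_one_le_find y.toList ['\"', '\"', '\"', '!']
        omega
      refine ⟨0, ((PySem.List.enumerate ys (off + 1)).filter
        (fun q => PySem.Str.find q.2 "\"\"\"!" > -1)).map (fun q => q.1), ?_, by simp⟩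
      rw [PySem.List.enumerate_cons]
      rw [List.filter_cons_of_pos (by simp [PySem.Str.find_eq, tlStart]; omega)]
      simp

-- the ends comprehension over range(a, len) on the suffix rest yields e = a + chEndLen rest
theorem ends_eq (rest : List String) (lines : List String) (a : Int)
    (ha : 0 ≤ a) (hle : a ≤ PySem.List.len lines)
    (hdrop : lines.drop a.toNat = rest) :
    (match (PySem.List.pyRange a (PySem.List.len lines) 1).filter
        (fun j => PySem.Str.find (PySem.List.pyGetD lines j "") "\"\"\"" > -1) with
      | [] => PySem.List.len lines
      | j :: _ => j + 1) = a + (chEndLen rest : Int) := by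
  induction rest generalizing a with
  | nil =>
    have hlen : PySem.List.len lines = a := by
      have := List.drop_eq_nil_iff.mp hdrop
      simp only [PySem.List.len_eq] at hle ⊢
      omega
    rw [hlen, PySem.List.pyRange_one_eq_nil (le_refl a)]
    simp [chEndLen]
  | cons r rs ih =>
    have hne : lines.drop a.toNat ≠ [] := by rw [hdrop]; simp
    have hlt : a < PySem.List.len lines := by
      simp only [PySem.List.len_eq]
      have := List.drop_eq_nil_iff.not.mp (by simpa using hne)
      omega
    have hget : PySem.List.pyGetD lines a "" = r := by
      have h0 := congrArg (fun l => l[0]?) hdrop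
      simp only [List.getElem?_drop, Nat.add_zero, List.getElem?_cons_zero] at h0
      rw [show a = ((a.toNat : Nat) : Int) from (Int.toNat_of_nonneg ha).symm,
        PySem.List.pyGetD_natCast, List.getD_eq_getElem?_getD, h0]
      rfl
    rw [PySem.List.pyRange_one_cons hlt]
    by_cases hr : (-1 : Int) < PySem.Chars.find r.toList ['\"', '\"', '\"']
    · rw [List.filter_cons_of_pos (by simp [PySem.Str.find_eq, tlEnd, hget]; omega)]
      have hE1 : chEndLen (r :: rs) = 1 := by
        simp [chEndLen, PySem.Str.find_eq, tlEnd, hr]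
      rw [hE1]
      push_cast
      ring
    · rw [List.filter_cons_of_neg (by simp [PySem.Str.find_eq, tlEnd, hget]; omega)]
      have hdrop' : lines.drop (a + 1).toNat = rs := by
        have h3 : (a + 1).toNat = a.toNat + 1 := by omega
        have h4 := congrArg (fun l => l.drop 1) hdrop
        simp only [List.drop_drop, List.drop_succ_cons, List.drop_zero] at h4
        rw [h3]
        exact h4
      rw [ih (a + 1) (by omega) (by omega) hdrop']
      have hE1 : chEndLen (r :: rs) = 1 + chEndLen rs := by
        simp [chEndLen, PySem.Str.find_eq, tlEnd, hr]
      rw [hE1]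
      push_cast
      ring

theorem collect_take (rest : List String) :
    chCollect rest = rest.take (chEndLen rest) := by
  induction rest with
  | nil => simp [chCollect, chEndLen]
  | cons x xs ih =>
    by_cases h : (-1 : Int) < PySem.Chars.find x.toList ['\"', '\"', '\"']
    · simp [chCollect, chEndLen, PySem.Str.find_eq, tlEnd, h]
    · simp [chCollect, chEndLen, PySem.Str.find_eq, tlEnd, h,
        Nat.add_comm 1 (chEndLen xs), ih]

theorem alt_spec (code : List String) :
    CheckForHeader_alt code = chSpec code := by
  cases hf : chFindStart code with
  | none =>
    have h0 := starts_none code 0 hf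
    simp only [CheckForHeader_alt, chSpec, hf]
    rw [h0]
    rfl
  | some pr =>
    obtain ⟨x, rest⟩ := pr
    obtain ⟨p, tl, h1, h2⟩ := starts_some code 0 x rest hf
    have hp : p < code.length := by
      by_contra hc
      rw [List.drop_eq_nil_of_le (by omega)] at h2
      exact absurd h2 (by simp)
    have hdrop' : code.drop ((p : Int) + 1).toNat = rest := by
      have h3 : ((p : Int) + 1).toNat = p + 1 := by omega
      have h4 := congrArg (fun l => l.drop 1) h2
      simp only [List.drop_drop, List.drop_succ_cons, List.drop_zero] at h4
      rw [h3]
      exact h4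
    have he := ends_eq rest code ((p : Int) + 1) (by omega)
      (by simp only [PySem.List.len_eq]; omega) hdrop'
    have hE : ((p : Int) + 1) + (chEndLen rest : Int)
        = (((p + 1 + chEndLen rest : Nat)) : Int) := by push_cast; ring
    simp only [CheckForHeader_alt, chSpec, hf, h1, zero_add]
    rw [he, hE, PySem.List.slice_natCast]
    rw [h2]
    have ht : p + 1 + chEndLen rest - p = chEndLen rest + 1 := by omega
    rw [ht, List.take_succ_cons, collect_take]

-- ===== VERDICT (by name: the statement is the Claim_ definition above) =====
theorem CheckForHeader_spec : Claim_equal_CheckForHeader := by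
  intro code _
  unfold Spec_CheckForHeader CheckForHeader
  rw [loopA_spec, alt_spec]
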